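-- pv_equiv track=rewrite | github.com/jason660519/Proxy-Crawler-System | src/html_to_markdown/data_pipeline.py | _parse_raw_file
-- ===== SOURCE A (Python) =====
-- from typing import Dict, List, Optional, Any
--
-- def _parse_raw_file(content: str) -> tuple[Dict[str, str], str]:
--     """解析原始檔案的元資料和內容"""
--     lines = content.split('\n')
--
--     if not lines[0].strip() == '---':
--         return {}, content
--
--     metadata = {}
--     content_start = 0
--
--     for i, line in enumerate(lines[1:], 1):
--         if line.strip() == '---':
--             content_start = i + 1
--             break
--
--         if ':' in line:
--             key, value = line.split(':', 1)
--             metadata[key.strip()] = value.strip()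
--
--     markdown_content = '\n'.join(lines[content_start:]).strip()
--     return metadata, markdown_content
-- ===== SOURCE B (Python) =====
-- def _parse_raw_file(content: str):
--     """Parse front-matter metadata and content.
--
--     Single full pass with a state machine: instead of breaking out of the loop
--     at the closing fence and slicing the original line list (as the scan-and-
--     slice version does), this walks every line exactly once carrying a mode
--     flag; in header mode it accumulates key/value pairs, after the closing
--     fence it switches mode and accumulates the body lines themselves. If the
--     fence never closes, the whole file is the body.
--     """
--     lines = content.split('\n')
--     if lines[0].strip() != '---':
--         return {}, content
--     metadata = {}
--     body = []
--     in_header = True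
--     for line in lines[1:]:
--         if not in_header:
--             body.append(line)
--         elif line.strip() == '---':
--             in_header = False
--         elif ':' in line:
--             key, value = line.split(':', 1)
--             metadata[key.strip()] = value.strip()
--     if in_header:
--         body = lines
--     return metadata, '\n'.join(body).strip()
-- ===== Notes on version B (the rewrite author's own statement) =====
-- stated objective: alternative
-- what changed: Replaces A's break-out-of-the-loop plus slice-and-rejoin of the original line list with a single full-pass state machine that never indexes or slices: a mode flag flips at the closing fence, metadata pairs are accumulated in header mode and the body lines themselves are accumulated afterwards.
import Mathlib
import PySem

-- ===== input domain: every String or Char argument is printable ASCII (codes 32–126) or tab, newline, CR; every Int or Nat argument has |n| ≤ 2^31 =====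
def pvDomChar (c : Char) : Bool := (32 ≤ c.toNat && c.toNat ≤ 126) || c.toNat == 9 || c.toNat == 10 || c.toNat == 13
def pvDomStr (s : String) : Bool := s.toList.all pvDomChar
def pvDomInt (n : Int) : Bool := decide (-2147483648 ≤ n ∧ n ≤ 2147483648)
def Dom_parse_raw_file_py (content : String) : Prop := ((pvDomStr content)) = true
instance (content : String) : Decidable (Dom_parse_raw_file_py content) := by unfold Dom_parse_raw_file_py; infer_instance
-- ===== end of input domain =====

-- ===== PORT A =====
-- B replaces A's break-and-slice loop with a single full-pass state machine that
-- accumulates the body lines themselves (alternative decomposition, same cost).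
-- Port of A's break-loop: index-carrying recursion over lines[1:] with the dict and content_start as state.
def parseALoop (rest : List String) (i : Nat) (md : PySem.Dict String String) :
    PySem.Dict String String × Nat :=
  match rest with
  | [] => (md, 0)
  | l :: rest' =>
    if PySem.Str.strip l = "---" then (md, i + 1)
    else
      if PySem.Str.isIn ":" l then
        let parts := (PySem.Str.splitMax? l ":" 1).getD []
        parseALoop rest' (i + 1)
          (md.insert (PySem.Str.strip (parts.getD 0 "")) (PySem.Str.strip (parts.getD 1 "")))
      else parseALoop rest' (i + 1) md

def parse_raw_file_py (content : String) : (List (String × String)) × String :=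
  let lines := (PySem.Str.split? content "\n").getD []
  if ¬ (PySem.Str.strip (lines.headD "") = "---") then ([], content)
  else
    let r := parseALoop (PySem.List.slice lines (some 1) none) 1 PySem.Dict.empty
    (r.1.items,
     PySem.Str.strip (PySem.Str.join "\n" (PySem.List.slice lines (some (r.2 : Int)) none)))

-- ===== PORT B =====
-- Port of B: one fold over lines[1:] with state (in_header, metadata, body);
-- the body lines are accumulated by the fold itself, never sliced out.
def parseBStep (st : Bool × PySem.Dict String String × List String) (line : String) :
    Bool × PySem.Dict String String × List String :=
  match st with
  | (inHeader, md, body) =>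
    if ¬ inHeader then (inHeader, md, body ++ [line])
    else if PySem.Str.strip line = "---" then (false, md, body)
    else if PySem.Str.isIn ":" line then
      let kv := (PySem.Str.splitMax? line ":" 1).getD []
      (inHeader, md.insert (PySem.Str.strip (kv.getD 0 "")) (PySem.Str.strip (kv.getD 1 "")), body)
    else (inHeader, md, body)

def parse_raw_file_py_alt (content : String) : (List (String × String)) × String :=
  let lines := (PySem.Str.split? content "\n").getD []
  if ¬ (PySem.Str.strip (lines.headD "") = "---") then ([], content)
  else
    let st := (PySem.List.slice lines (some 1) none).foldl parseBStep
                (true, PySem.Dict.empty, [])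
    let body := if st.1 then lines else st.2.2
    (st.2.1.items, PySem.Str.strip (PySem.Str.join "\n" body))

-- ===== PRECONDITION & SPEC =====
def Spec_parse_raw_file_py (content : String) (out : (List (String × String)) × String) : Prop := out = parse_raw_file_py_alt content
instance (content : String) (out : (List (String × String)) × String) : Decidable (Spec_parse_raw_file_py content out) := by unfold Spec_parse_raw_file_py; infer_instance

-- ===== CLAIM (what is proved, stated in full; the proofs are below) =====
def Claim_equal_parse_raw_file_py : Prop := ∀ (content : String), Dom_parse_raw_file_py content → Spec_parse_raw_file_py content (parse_raw_file_py content)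

-- ===== LEMMAS AND PROOFS =====

def pvStep (d : PySem.Dict String String) (ln : String) : PySem.Dict String String :=
  if PySem.Str.isIn ":" ln then
    let kv := (PySem.Str.splitMax? ln ":" 1).getD []
    d.insert (PySem.Str.strip (kv.getD 0 "")) (PySem.Str.strip (kv.getD 1 ""))
  else d

lemma loopA_eq (rest : List String) (i : Nat) (md : PySem.Dict String String) :
    parseALoop rest i md =
      ((rest.takeWhile (fun l => ¬ (PySem.Str.strip l = "---"))).foldl pvStep md,
       if (rest.dropWhile (fun l => ¬ (PySem.Str.strip l = "---"))).isEmpty then 0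
       else i + (rest.takeWhile (fun l => ¬ (PySem.Str.strip l = "---"))).length + 1) := by
  induction rest generalizing i md with
  | nil => simp [parseALoop]
  | cons l rest' ih =>
    by_cases h : PySem.Str.strip l = "---" <;>
      simp [parseALoop, h, List.takeWhile_cons, List.dropWhile_cons, pvStep, ih] <;>
      split_ifs <;> simp_all <;> omega

lemma foldB_false (rest : List String) (md : PySem.Dict String String) (body : List String) :
    rest.foldl parseBStep (false, md, body) = (false, md, body ++ rest) := by
  induction rest generalizing body with
  | nil => simp
  | cons l rest' ih => simp [List.foldl_cons, parseBStep, ih]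

lemma foldB_true (rest : List String) (md : PySem.Dict String String) :
    rest.foldl parseBStep (true, md, []) =
      ((rest.dropWhile (fun l => ¬ (PySem.Str.strip l = "---"))).isEmpty,
       (rest.takeWhile (fun l => ¬ (PySem.Str.strip l = "---"))).foldl pvStep md,
       (rest.dropWhile (fun l => ¬ (PySem.Str.strip l = "---"))).tail) := by
  induction rest generalizing md with
  | nil => simp
  | cons l rest' ih =>
    by_cases h : PySem.Str.strip l = "---"
    · simp [List.foldl_cons, parseBStep, h, List.dropWhile_cons, foldB_false]
    · simp [List.foldl_cons, parseBStep, h, List.takeWhile_cons, List.dropWhile_cons,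
        pvStep, ih]
      split_ifs <;> simp_all [pvStep]

lemma dropWhile_eq_drop_len (p : String → Bool) (xs : List String) :
    xs.dropWhile p = xs.drop (xs.takeWhile p).length := by
  induction xs with
  | nil => simp
  | cons x xs ih =>
    by_cases h : p x <;> simp [List.takeWhile_cons, List.dropWhile_cons, h, ih]

-- ===== VERDICT (by name: the statement is the Claim_ definition above) =====
theorem parse_raw_file_py_spec : Claim_equal_parse_raw_file_py := by
  intro content _
  unfold Spec_parse_raw_file_py parse_raw_file_py parse_raw_file_py_alt
  set lines := (PySem.Str.split? content "\n").getD [] with hlines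
  by_cases h0 : PySem.Str.strip (lines.headD "") = "---"
  · simp only [h0, not_true_eq_false, if_false]
    rw [PySem.List.slice_from_one, loopA_eq, foldB_true]
    set rest := lines.tail with hrest
    set p : String → Bool := (fun l => ¬ (PySem.Str.strip l = "---")) with hp
    by_cases he : (rest.dropWhile p).isEmpty
    · simp only [he, if_pos]
      have : PySem.List.slice lines (some ((0 : Nat) : Int)) none = lines :=
        by simpa using PySem.List.slice_from_natCast lines 0
      simp_all
    · have hc : PySem.List.slice lines
          (some (((1 + (rest.takeWhile p).length + 1 : Nat) : Int))) none =
          (rest.dropWhile p).tail := by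
        rw [PySem.List.slice_from_natCast, dropWhile_eq_drop_len p rest,
          List.tail_drop, hrest, ← List.drop_one, List.drop_drop]
        congr 1
      simp only [he, Bool.false_eq_true, if_false, Bool.not_eq_true] at *
      simp_all
  · rw [if_pos h0, if_pos h0]
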